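-- pv_equiv track=rewrite | github.com/foxtailer/learn | algs__and_ds/PPI/longest_sub_arr_diff.py | longest_subarray_langth
-- ===== SOURCE A (Python) =====
-- import collections
--
-- def longest_subarray_langth(nums, k):
--     n = len(nums)
--     max_queue = collections.deque()
--     min_queue = collections.deque()
--     left = 0
--     longest_len = 0
--
--     for right in range(n):
--         while max_queue and nums[right] > max_queue[-1]:
--             max_queue.pop()
--         while min_queue and nums[right] < min_queue[-1]:
--             min_queue.pop()
--
--         max_queue.append(nums[right])
--         min_queue.append(nums[right])
--
--         while max_queue[0] - min_queue[0] > k: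
--             if nums[left] == max_queue[0]:
--                 max_queue.popleft()
--             if nums[left] == min_queue[0]:
--                 min_queue.popleft()
--             left += 1
--
--         longest_len = max(longest_len, right-left+1)
--
--     return longest_len
-- ===== SOURCE B (Python) =====
-- import bisect
--
-- def longest_subarray_langth(nums, k):
--     # Sliding window over nums; the window's values are kept in one sorted
--     # list, so min/max are its ends (no monotonic deques).
--     window = []
--     left = 0
--     best = 0
--     for right, x in enumerate(nums):
--         bisect.insort(window, x)
--         while window[-1] - window[0] > k:
--             window.remove(nums[left])
--             left += 1
--         best = max(best, right - left + 1)
--     return best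
-- ===== Notes on version B (the rewrite author's own statement) =====
-- stated objective: simpler
-- what changed: The two monotonic deques and their three inner maintenance loops are replaced by a single sorted list kept with bisect.insort; the window min and max are simply its two ends.
import Mathlib
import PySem

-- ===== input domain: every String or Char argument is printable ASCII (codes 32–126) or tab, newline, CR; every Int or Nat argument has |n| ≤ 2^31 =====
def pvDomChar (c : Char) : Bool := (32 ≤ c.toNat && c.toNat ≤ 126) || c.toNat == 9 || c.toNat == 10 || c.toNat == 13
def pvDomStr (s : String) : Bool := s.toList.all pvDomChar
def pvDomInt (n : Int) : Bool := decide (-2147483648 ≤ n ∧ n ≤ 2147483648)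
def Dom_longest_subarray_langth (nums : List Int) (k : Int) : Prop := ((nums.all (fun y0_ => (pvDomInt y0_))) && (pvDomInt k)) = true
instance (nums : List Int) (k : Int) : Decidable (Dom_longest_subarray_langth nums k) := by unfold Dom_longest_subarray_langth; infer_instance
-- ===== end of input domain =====

-- B replaces A's two monotonic deques (and their three inner maintenance loops) by one
-- sorted window list whose ends are the window min/max; equal on Pre_ (A raises otherwise).


-- ===== PORT A =====
-- 'while q and p(q[-1]): q.pop()'  (the deque tail-maintenance loop, used with both comparisons)
def popTailWhile (p : Int → Bool) (q : List Int) : List Int :=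
  if h : q ≠ [] ∧ p (q.getLastD 0) then popTailWhile p q.dropLast else q
termination_by q.length
decreasing_by
  simp only [List.length_dropLast]
  have := List.length_pos_iff.mpr h.1
  omega

-- 'while max_queue[0] - min_queue[0] > k: …'; fuel (n+1) only makes the recursion total,
-- under Pre_ the loop always stops earlier (Python raises IndexError exactly where it would not).
def advanceA (nums : List Int) (k : Int) : Nat → List Int → List Int → Nat → List Int × List Int × Nat
  | 0, maxq, minq, left => (maxq, minq, left)
  | fuel+1, maxq, minq, left =>
    if maxq.headD 0 - minq.headD 0 > k then
      advanceA nums k fuel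
        (if nums.getD left 0 = maxq.headD 0 then maxq.tail else maxq)
        (if nums.getD left 0 = minq.headD 0 then minq.tail else minq)
        (left + 1)
    else (maxq, minq, left)

-- one iteration of 'for right in range(n)'; state = (max_queue, min_queue, left, longest_len)
def stepA (nums : List Int) (k : Int) (s : List Int × List Int × Nat × Int) (right : Nat) :
    List Int × List Int × Nat × Int :=
  let x := nums.getD right 0
  let maxq := popTailWhile (fun z => decide (z < x)) s.1 ++ [x]
  let minq := popTailWhile (fun z => decide (x < z)) s.2.1 ++ [x]
  let t := advanceA nums k (nums.length + 1) maxq minq s.2.2.1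
  (t.1, t.2.1, t.2.2, max s.2.2.2 ((right : Int) - (t.2.2 : Int) + 1))

def longest_subarray_langth (nums : List Int) (k : Int) : Int :=
  ((List.range nums.length).foldl (stepA nums k) ([], [], 0, 0)).2.2.2

-- ===== PORT B =====
-- bisect.insort: insert x into the sorted list, after equal elements
def insort (w : List Int) (x : Int) : List Int :=
  match w with
  | [] => [x]
  | y :: t => if y ≤ x then y :: insort t x else x :: y :: t

-- 'while window[-1] - window[0] > k: window.remove(nums[left]); left += 1'
-- (list.remove = erase first occurrence; fuel only makes the recursion total, as in A)
def advanceB (nums : List Int) (k : Int) : Nat → List Int → Nat → List Int × Nat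
  | 0, w, left => (w, left)
  | fuel+1, w, left =>
    if w.getLastD 0 - w.headD 0 > k then
      advanceB nums k fuel (w.erase (nums.getD left 0)) (left + 1)
    else (w, left)

-- one iteration of 'for right, x in enumerate(nums)'; state = (window, left, best)
def stepB (nums : List Int) (k : Int) (s : List Int × Nat × Int) (right : Nat) :
    List Int × Nat × Int :=
  let w := insort s.1 (nums.getD right 0)
  let t := advanceB nums k (nums.length + 1) w s.2.1
  (t.1, t.2, max s.2.2 ((right : Int) - (t.2 : Int) + 1))

def longest_subarray_langth_alt (nums : List Int) (k : Int) : Int :=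
  ((List.range nums.length).foldl (stepB nums k) ([], 0, 0)).2.2

-- ===== PRECONDITION & SPEC =====
-- On nonempty nums with k < 0 the Python A empties its deques and raises IndexError at
-- max_queue[0]; exactly those inputs are excluded.
def Pre_longest_subarray_langth (nums : List Int) (k : Int) : Prop := nums = [] ∨ 0 ≤ k
instance (nums : List Int) (k : Int) : Decidable (Pre_longest_subarray_langth nums k) := by
  unfold Pre_longest_subarray_langth; infer_instance

def pvWitness_longest_subarray_langth : List Int × Int := ([1, 3, 2], 2)

def Spec_longest_subarray_langth (nums : List Int) (k : Int) (out : Int) : Prop :=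
  out = longest_subarray_langth_alt nums k
instance (nums : List Int) (k : Int) (out : Int) : Decidable (Spec_longest_subarray_langth nums k out) := by
  unfold Spec_longest_subarray_langth; infer_instance

-- ===== CLAIM (what is proved, stated in full; the proofs are below) =====
def Claim_equal_longest_subarray_langth : Prop :=
  ∀ (nums : List Int) (k : Int), Dom_longest_subarray_langth nums k →
    Pre_longest_subarray_langth nums k →
    Spec_longest_subarray_langth nums k (longest_subarray_langth nums k)

-- ===== LEMMAS AND PROOFS =====

-- the window nums[l:r] (elements with index in [l, r))
def win (nums : List Int) (l r : Nat) : List Int := (nums.take r).drop l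

-- the contents of a monotonic deque after pushing the whole window, characterised from the left:
-- an element survives iff no later window element beats it (r z a = "a may stay in front of z")
def skel (r : Int → Int → Prop) [DecidableRel r] : List Int → List Int
  | [] => []
  | a :: t => if ∀ z ∈ t, r z a then a :: skel r t else skel r t

theorem popTail_nil (p : Int → Bool) : popTailWhile p [] = [] := by
  rw [popTailWhile]; simp

theorem popTail_concat (p : Int → Bool) (y : Int) (l : List Int) :
    popTailWhile p (l ++ [y]) = if p y = true then popTailWhile p l else l ++ [y] := by
  rw [popTailWhile]
  by_cases hy : p y = true
  · rw [dif_pos (by simp [hy]), List.dropLast_concat, if_pos hy]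
  · rw [dif_neg (by simp [hy]), if_neg hy]

theorem popTail_stop (p : Int → Bool) (a : Int) (q : List Int) (hp : p a = false) :
    popTailWhile p (a :: q) = a :: popTailWhile p q := by
  induction q using List.reverseRecOn with
  | nil => rw [popTailWhile, dif_neg (by simp [hp]), popTail_nil]
  | append_singleton q y ih =>
    have e : a :: (q ++ [y]) = (a :: q) ++ [y] := by simp
    rw [e, popTail_concat, popTail_concat]
    by_cases hy : p y = true
    · simp only [if_pos hy]; exact ih
    · simp only [if_neg hy]; simp

theorem popTail_all (p : Int → Bool) (q : List Int) (h : ∀ z ∈ q, p z = true) :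
    popTailWhile p q = [] := by
  induction q using List.reverseRecOn with
  | nil => exact popTail_nil p
  | append_singleton q y ih =>
    rw [popTail_concat, if_pos (h y (by simp))]
    exact ih fun z hz => h z (by simp [hz])

theorem skel_subset (r : Int → Int → Prop) [DecidableRel r] (w : List Int) :
    ∀ z ∈ skel r w, z ∈ w := by
  induction w with
  | nil => simp [skel]
  | cons a t ih =>
    intro z hz
    simp only [skel] at hz
    split at hz
    · rcases hz with _ | hz
      · exact List.mem_cons_self
      · exact List.mem_cons_of_mem _ (ih z (by assumption))
    · exact List.mem_cons_of_mem _ (ih z hz)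

theorem skel_push (r : Int → Int → Prop) [DecidableRel r] (p : Int → Bool) (x : Int)
    (htrans : ∀ u v w, r u v → r v w → r u w)
    (hp : ∀ z, p z = true ↔ ¬ r x z) (w : List Int) :
    popTailWhile p (skel r w) ++ [x] = skel r (w ++ [x]) := by
  induction w with
  | nil => simp [skel, popTail_nil]
  | cons a t ih =>
    by_cases h : ∀ z ∈ t, r z a
    · have hs : skel r (a :: t) = a :: skel r t := by simp only [skel, if_pos h]
      by_cases hxa : r x a
      · have hcond : ∀ z ∈ t ++ [x], r z a := by
          intro z hz
          rcases List.mem_append.mp hz with hz | hz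
          · exact h z hz
          · simp at hz; subst hz; exact hxa
        have hpa : p a = false := by
          cases hpa' : p a
          · rfl
          · exact absurd hxa ((hp a).mp hpa')
        have hs2 : skel r ((a :: t) ++ [x]) = a :: skel r (t ++ [x]) := by
          rw [List.cons_append]; simp only [skel, if_pos hcond]
        rw [hs, popTail_stop p a _ hpa, hs2, ← ih]
        simp
      · have hcond : ¬ ∀ z ∈ t ++ [x], r z a := by
          push_neg
          exact ⟨x, by simp, hxa⟩
        have hall : ∀ z ∈ a :: skel r t, p z = true := by
          intro z hz
          rcases List.mem_cons.mp hz with hz | hz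
          · subst hz; exact (hp z).mpr hxa
          · exact (hp z).mpr fun hxz => hxa (htrans _ _ _ hxz (h z (skel_subset r t z hz)))
        have h2 : ∀ z ∈ skel r t, p z = true := fun z hz => hall z (List.mem_cons_of_mem _ hz)
        have hs2 : skel r ((a :: t) ++ [x]) = skel r (t ++ [x]) := by
          rw [List.cons_append]; simp only [skel, if_neg hcond]
        rw [hs, popTail_all p _ hall, hs2, ← ih, popTail_all p _ h2]
    · have hs : skel r (a :: t) = skel r t := by simp only [skel, if_neg h]
      have hcond : ¬ ∀ z ∈ t ++ [x], r z a := by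
        push_neg at h ⊢
        obtain ⟨z0, h1, h2⟩ := h
        exact ⟨z0, List.mem_append.mpr (Or.inl h1), h2⟩
      have hs2 : skel r ((a :: t) ++ [x]) = skel r (t ++ [x]) := by
        rw [List.cons_append]; simp only [skel, if_neg hcond]
      rw [hs, hs2, ← ih]

theorem skel_max (r : Int → Int → Prop) [DecidableRel r]
    (htot : ∀ u v, r u v ∨ r v u) (htrans : ∀ u v w, r u v → r v w → r u w)
    (w : List Int) (hw : w ≠ []) :
    ∃ m s, skel r w = m :: s ∧ m ∈ w ∧ ∀ z ∈ w, r z m := by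
  induction w with
  | nil => simp at hw
  | cons a t ih =>
    by_cases h : ∀ z ∈ t, r z a
    · refine ⟨a, skel r t, by simp only [skel, if_pos h], List.mem_cons_self, ?_⟩
      intro z hz
      rcases List.mem_cons.mp hz with hz | hz
      · subst hz; rcases htot z z with h' | h' <;> exact h'
      · exact h z hz
    · have hneg := h
      push_neg at hneg
      obtain ⟨z0, hz0t, hz0⟩ := hneg
      have ht : t ≠ [] := by rintro rfl; simp at hz0t
      obtain ⟨m, sTail, hms, hmem, hbound⟩ := ih ht
      refine ⟨m, sTail, by simp only [skel, if_neg h]; exact hms,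
        List.mem_cons_of_mem _ hmem, ?_⟩
      intro z hz
      rcases List.mem_cons.mp hz with hz | hz
      · subst hz
        rcases htot z z0 with h' | h'
        · exact htrans _ _ _ h' (hbound z0 hz0t)
        · exact absurd h' hz0
      · exact hbound z hz

theorem skel_pop (r : Int → Int → Prop) [DecidableRel r]
    (htot : ∀ u v, r u v ∨ r v u) (htrans : ∀ u v w, r u v → r v w → r u w)
    (a : Int) (t : List Int) :
    (if a = (skel r (a :: t)).headD 0 then (skel r (a :: t)).tail else skel r (a :: t))
      = skel r t := by
  by_cases h : ∀ z ∈ t, r z a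
  · simp only [skel, if_pos h]
    simp
  · have hneg := h
    push_neg at hneg
    obtain ⟨z0, hz0t, hz0⟩ := hneg
    have ht : t ≠ [] := by rintro rfl; simp at hz0t
    obtain ⟨m, sTail, hms, hmem, hbound⟩ := skel_max r htot htrans t ht
    have hskel : skel r (a :: t) = skel r t := by simp only [skel, if_neg h]
    have hne : a ≠ m := by
      rintro rfl
      exact hz0 (hbound z0 hz0t)
    rw [hskel, hms, if_neg (by simp only [List.headD_cons]; exact hne)]

theorem insort_perm (w : List Int) (x : Int) : List.Perm (insort w x) (x :: w) := by
  induction w with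
  | nil => simp [insort]
  | cons y t ih =>
    simp only [insort]
    split
    · exact (ih.cons y).trans (List.Perm.swap x y t)
    · exact List.Perm.refl _

theorem insort_sorted (w : List Int) (x : Int) (h : List.Pairwise (· ≤ ·) w) :
    List.Pairwise (· ≤ ·) (insort w x) := by
  induction w with
  | nil => simp [insort]
  | cons y t ih =>
    rw [List.pairwise_cons] at h
    simp only [insort]
    by_cases hyx : y ≤ x
    · rw [if_pos hyx, List.pairwise_cons]
      refine ⟨fun z hz => ?_, ih h.2⟩
      rcases List.mem_cons.mp ((insort_perm t x).mem_iff.mp hz) with hz | hz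
      · subst hz; exact hyx
      · exact h.1 z hz
    · rw [if_neg hyx, List.pairwise_cons]
      refine ⟨fun z hz => ?_, List.pairwise_cons.mpr h⟩
      rcases List.mem_cons.mp hz with hz | hz
      · subst hz; omega
      · exact le_trans (by omega) (h.1 z hz)

theorem sorted_headD_le (w : List Int) (h : List.Pairwise (· ≤ ·) w) :
    ∀ z ∈ w, w.headD 0 ≤ z := by
  cases w with
  | nil => simp
  | cons m s =>
    rw [List.pairwise_cons] at h
    intro z hz
    rcases hz with _ | hz
    · simp
    · simpa using h.1 z (by assumption)

theorem sorted_le_getLastD (w : List Int) (h : List.Pairwise (· ≤ ·) w) :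
    ∀ z ∈ w, z ≤ w.getLastD 0 := by
  induction w using List.reverseRecOn with
  | nil => simp
  | append_singleton q y _ =>
    intro z hz
    simp only [List.getLastD_concat]
    rcases List.mem_append.mp hz with hz | hz
    · exact List.pairwise_append.mp h |>.2.2 z hz y (by simp)
    · simp at hz; omega

theorem getLastD_mem (w : List Int) (hw : w ≠ []) : w.getLastD 0 ∈ w := by
  induction w using List.reverseRecOn with
  | nil => simp at hw
  | append_singleton q y _ => simp

theorem win_succ (nums : List Int) (l r : Nat) (hl : l ≤ r) (hr : r < nums.length) :
    win nums l (r+1) = win nums l r ++ [nums.getD r 0] := by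
  unfold win
  rw [List.take_succ, List.getElem?_eq_getElem hr, Option.toList_some,
    List.drop_append_of_le_length (by simp; omega), List.getD_eq_getElem _ _ hr]

theorem win_cons (nums : List Int) (l r : Nat) (hl : l < r) (hr : r ≤ nums.length) :
    win nums l r = nums.getD l 0 :: win nums (l+1) r := by
  unfold win
  have h1 : l < (nums.take r).length := by simp; omega
  rw [List.drop_eq_getElem_cons h1, List.getElem_take,
    List.getD_eq_getElem _ _ (by simp at h1; omega)]

theorem win_length (nums : List Int) (l r : Nat) (hr : r ≤ nums.length) :
    (win nums l r).length = r - l := by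
  unfold win
  simp
  omega

theorem headD_mem (w : List Int) (hw : w ≠ []) : w.headD 0 ∈ w := by
  cases w with
  | nil => simp at hw
  | cons a t => simp

theorem adv_sim (nums : List Int) (k : Int) (hk : 0 ≤ k) (r : Nat) (hr : r < nums.length) :
    ∀ fuel l w, l ≤ r → r + 1 - l ≤ fuel →
      List.Pairwise (· ≤ ·) w → List.Perm w (win nums l (r+1)) →
      ∃ l' w', l' ≤ r ∧
        advanceA nums k fuel (skel (· ≤ ·) (win nums l (r+1)))
            (skel (fun a b => b ≤ a) (win nums l (r+1))) l
          = (skel (· ≤ ·) (win nums l' (r+1)), skel (fun a b => b ≤ a) (win nums l' (r+1)), l') ∧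
        advanceB nums k fuel w l = (w', l') ∧
        List.Pairwise (· ≤ ·) w' ∧ List.Perm w' (win nums l' (r+1)) := by
  intro fuel
  induction fuel with
  | zero => intro l w hl hfuel _ _; omega
  | succ fuel ih =>
    intro l w hl hfuel hsort hperm
    have hWne : win nums l (r+1) ≠ [] := by
      intro hnil
      have := win_length nums l (r+1) (by omega)
      rw [hnil] at this
      simp at this
      omega
    have htrans1 : ∀ u v z : Int, u ≤ v → v ≤ z → u ≤ z := fun _ _ _ => le_trans
    have htot1 : ∀ u v : Int, u ≤ v ∨ v ≤ u := le_total
    have htot2 : ∀ u v : Int, (fun a b => b ≤ a) u v ∨ (fun a b => b ≤ a) v u :=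
      fun u v => le_total v u
    have htrans2 : ∀ u v z : Int, (fun a b => b ≤ a) u v → (fun a b => b ≤ a) v z →
        (fun a b => b ≤ a) u z := fun _ _ _ h1 h2 => le_trans h2 h1
    obtain ⟨m1, s1, hm1, hm1mem, hm1bd⟩ := skel_max (· ≤ ·) htot1 htrans1 _ hWne
    obtain ⟨m2, s2, hm2, hm2mem, hm2bd⟩ := skel_max (fun a b => b ≤ a) htot2 htrans2 _ hWne
    have hwne : w ≠ [] := by
      intro hnil
      subst hnil
      exact hWne (List.perm_nil.mp hperm.symm)
    have hlast : w.getLastD 0 = m1 :=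
      le_antisymm (hm1bd _ (hperm.mem_iff.mp (getLastD_mem w hwne)))
        (sorted_le_getLastD w hsort m1 (hperm.mem_iff.mpr hm1mem))
    have hhead : w.headD 0 = m2 :=
      le_antisymm (sorted_headD_le w hsort m2 (hperm.mem_iff.mpr hm2mem))
        (hm2bd _ (hperm.mem_iff.mp (headD_mem w hwne)))
    by_cases hcond : m1 - m2 > k
    · have hlr : l < r := by
        rcases Nat.lt_or_ge l r with h' | h'
        · exact h'
        · exfalso
          have hsing : win nums l (r+1) = [nums.getD l 0] := by
            rw [win_cons nums l (r+1) (by omega) (by omega)]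
            have h0 : (win nums (l+1) (r+1)).length = 0 := by
              rw [win_length nums _ _ (by omega)]
              omega
            rw [List.length_eq_zero_iff.mp h0]
          rw [hsing] at hm1mem hm2mem
          simp at hm1mem hm2mem
          omega
      have hWcons : win nums l (r+1) = nums.getD l 0 :: win nums (l+1) (r+1) :=
        win_cons nums l (r+1) (by omega) (by omega)
      have hpopmax : (if nums.getD l 0 = (skel (· ≤ ·) (win nums l (r+1))).headD 0
          then (skel (· ≤ ·) (win nums l (r+1))).tail
          else skel (· ≤ ·) (win nums l (r+1)))
          = skel (· ≤ ·) (win nums (l+1) (r+1)) := by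
        rw [hWcons]
        exact skel_pop _ htot1 htrans1 _ _
      have hpopmin : (if nums.getD l 0 = (skel (fun a b => b ≤ a) (win nums l (r+1))).headD 0
          then (skel (fun a b => b ≤ a) (win nums l (r+1))).tail
          else skel (fun a b => b ≤ a) (win nums l (r+1)))
          = skel (fun a b => b ≤ a) (win nums (l+1) (r+1)) := by
        rw [hWcons]
        exact skel_pop _ htot2 htrans2 _ _
      have hsort' : List.Pairwise (· ≤ ·) (w.erase (nums.getD l 0)) :=
        hsort.sublist List.erase_sublist
      have hperm' : List.Perm (w.erase (nums.getD l 0)) (win nums (l+1) (r+1)) := by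
        have h1 := hperm.erase (nums.getD l 0)
        rw [hWcons, List.erase_cons_head] at h1
        exact h1
      obtain ⟨l', w', hl', hA, hB, hs', hp'⟩ :=
        ih (l+1) (w.erase (nums.getD l 0)) (by omega) (by omega) hsort' hperm'
      refine ⟨l', w', hl', ?_, ?_, hs', hp'⟩
      · simp only [advanceA]
        rw [if_pos (by rw [hm1, hm2]; simpa using hcond), hpopmax, hpopmin]
        exact hA
      · simp only [advanceB]
        rw [if_pos (by rw [hlast, hhead]; exact hcond)]
        exact hB
    · refine ⟨l, w, hl, ?_, ?_, hsort, hperm⟩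
      · simp only [advanceA]
        rw [if_neg (by rw [hm1, hm2]; simpa using hcond)]
      · simp only [advanceB]
        rw [if_neg (by rw [hlast, hhead]; exact hcond)]

theorem outer_inv (nums : List Int) (k : Int) (hk : 0 ≤ k) :
    ∀ r, r ≤ nums.length →
      ∃ l L w, l ≤ r ∧ List.Pairwise (· ≤ ·) w ∧ List.Perm w (win nums l r) ∧
        (List.range r).foldl (stepA nums k) ([], [], 0, 0)
          = (skel (· ≤ ·) (win nums l r), skel (fun a b => b ≤ a) (win nums l r), l, L) ∧
        (List.range r).foldl (stepB nums k) ([], 0, 0) = (w, l, L) := by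
  intro r
  induction r with
  | zero =>
    intro _
    have h0 : win nums 0 0 = [] := by simp [win]
    exact ⟨0, 0, [], le_rfl, by simp, by simp [h0], by simp [h0, skel], by simp⟩
  | succ r ihr =>
    intro hr1
    obtain ⟨l, L, w, hl, hsort, hperm, hA, hB⟩ := ihr (by omega)
    have hrlen : r < nums.length := by omega
    have hpush1 : popTailWhile (fun z => decide (z < nums.getD r 0))
        (skel (· ≤ ·) (win nums l r)) ++ [nums.getD r 0]
        = skel (· ≤ ·) (win nums l (r+1)) := by
      rw [win_succ nums l r hl hrlen]
      exact skel_push (· ≤ ·) _ _ (fun _ _ _ => le_trans) (fun z => by simp) _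
    have hpush2 : popTailWhile (fun z => decide (nums.getD r 0 < z))
        (skel (fun a b => b ≤ a) (win nums l r)) ++ [nums.getD r 0]
        = skel (fun a b => b ≤ a) (win nums l (r+1)) := by
      rw [win_succ nums l r hl hrlen]
      exact skel_push (fun a b => b ≤ a) (fun z => decide (nums.getD r 0 < z)) (nums.getD r 0)
        (fun _ _ _ h1 h2 => le_trans h2 h1) (fun z => by simp) (win nums l r)
    have hsort2 : List.Pairwise (· ≤ ·) (insort w (nums.getD r 0)) :=
      insort_sorted _ _ hsort
    have hperm2 : List.Perm (insort w (nums.getD r 0)) (win nums l (r+1)) := by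
      rw [win_succ nums l r hl hrlen]
      exact (insort_perm w _).trans ((hperm.cons _).trans (List.perm_append_singleton _ _).symm)
    obtain ⟨l', w', hl', hAdvA, hAdvB, hs', hp'⟩ :=
      adv_sim nums k hk r hrlen (nums.length + 1) l (insort w (nums.getD r 0)) hl
        (by omega) hsort2 hperm2
    refine ⟨l', max L ((r : Int) - (l' : Int) + 1), w', by omega, hs', hp', ?_, ?_⟩
    · rw [List.range_succ, List.foldl_append, hA]
      simp only [List.foldl_cons, List.foldl_nil]
      simp only [stepA]
      rw [hpush1, hpush2, hAdvA]
    · rw [List.range_succ, List.foldl_append, hB]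
      simp only [List.foldl_cons, List.foldl_nil]
      simp only [stepB]
      rw [hAdvB]

-- ===== VERDICT (by name: the statement is the Claim_ definition above) =====
theorem longest_subarray_langth_spec : Claim_equal_longest_subarray_langth := by
  intro nums k _ hpre
  unfold Spec_longest_subarray_langth longest_subarray_langth longest_subarray_langth_alt
  rcases hpre with h | hk
  · subst h; simp
  · obtain ⟨l, L, w, _, _, _, hA, hB⟩ := outer_inv nums k hk nums.length le_rfl
    rw [hA, hB]
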